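-- pv_equiv track=rewrite | github.com/bohara2000/MARTA-Poetry | backend/import_user_poems.py | analyze_poem_themes
-- ===== SOURCE A (Python) =====
-- from typing import Dict, List, Any
--
-- def analyze_poem_themes(title: str, content: str) -> Dict[str, List[str]]:
--     """Basic analysis to suggest themes, imagery, and emotions.
--
--     Note: This provides suggested themes based on keyword detection.
--     You can manually add more themes later using the narrative manager.
--     """
--     content_lower = content.lower()
--
--     # Basic theme detection (suggestions only - you can add more themes manually)
--     themes = []
--     if any(word in content_lower for word in ['death', 'die', 'dying', 'grave', 'cemetery', 'mortality']):
--         themes.append('mortality')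
--     if any(word in content_lower for word in ['love', 'heart', 'beloved', 'romance', 'affection']):
--         themes.append('love')
--     if any(word in content_lower for word in ['time', 'past', 'future', 'memory', 'remember', 'temporal']):
--         themes.append('time')
--     if any(word in content_lower for word in ['nature', 'tree', 'forest', 'earth', 'green', 'woods', 'natural']):
--         themes.append('nature')
--     if any(word in content_lower for word in ['city', 'urban', 'street', 'building', 'train', 'station', 'metropolitan']):
--         themes.append('urban')
--     if any(word in content_lower for word in ['technology', 'network', 'digital', 'tech', 'networked', 'filaments', 'bio/techno']):
--         themes.append('technology')
--     if any(word in content_lower for word in ['journey', 'travel', 'path', 'road', 'destination', 'commuter', 'transit']):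
--         themes.append('journey')
--     if any(word in content_lower for word in ['silence', 'quiet', 'whisper', 'sound', 'noise', 'silent', 'voice']):
--         themes.append('sound_silence')
--     if any(word in content_lower for word in ['family', 'children', 'grandchildren', 'generations', 'ancestors']):
--         themes.append('family_generations')
--     if any(word in content_lower for word in ['transformation', 'change', 'evolution', 'becoming', 'transition']):
--         themes.append('transformation')
--     if any(word in content_lower for word in ['connection', 'network', 'relationship', 'link', 'bond']):
--         themes.append('connection')
--     if any(word in content_lower for word in ['isolation', 'alone', 'separate', 'disconnect', 'apart']):
--         themes.append('isolation')
--
--     # Basic imagery detection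
--     imagery = []
--     if any(word in content_lower for word in ['woods', 'forest', 'tree', 'leaves']):
--         imagery.append('forest')
--     if any(word in content_lower for word in ['station', 'train', 'platform', 'tracks']):
--         imagery.append('transit')
--     if any(word in content_lower for word in ['earth', 'ground', 'soil', 'underground']):
--         imagery.append('earth')
--     if any(word in content_lower for word in ['voice', 'sound', 'echo', 'whisper']):
--         imagery.append('voice')
--     if any(word in content_lower for word in ['children', 'child', 'grandchildren']):
--         imagery.append('children')
--     if any(word in content_lower for word in ['network', 'filaments', 'connection']):
--         imagery.append('network')
--
--     # Basic emotion detection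
--     emotions = []
--     if any(word in content_lower for word in ['cry', 'cried', 'tears', 'weeping']):
--         emotions.append('sorrow')
--     if any(word in content_lower for word in ['joy', 'happy', 'celebration', 'laugh']):
--         emotions.append('joy')
--     if any(word in content_lower for word in ['fear', 'afraid', 'terror', 'scared']):
--         emotions.append('fear')
--     if any(word in content_lower for word in ['wonder', 'mysterious', 'strange', 'surprise']):
--         emotions.append('wonder')
--     if any(word in content_lower for word in ['alone', 'lonely', 'solitude', 'isolation']):
--         emotions.append('loneliness')
--     if any(word in content_lower for word in ['alive', 'living', 'life', 'vital']):
--         emotions.append('vitality')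
--
--     return {
--         'themes': themes,
--         'imagery': imagery,
--         'emotions': emotions
--     }
-- ===== SOURCE B (Python) =====
-- # B: different algorithm — a single position-by-position scan of the lowered text
-- # computes the set of keywords that occur (prefix test at each offset), then each
-- # label list is read off the three ordered tables by membership in that set.
--
-- _THEMES = [
--     ('mortality', ['death', 'die', 'dying', 'grave', 'cemetery', 'mortality']),
--     ('love', ['love', 'heart', 'beloved', 'romance', 'affection']),
--     ('time', ['time', 'past', 'future', 'memory', 'remember', 'temporal']),
--     ('nature', ['nature', 'tree', 'forest', 'earth', 'green', 'woods', 'natural']),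
--     ('urban', ['city', 'urban', 'street', 'building', 'train', 'station', 'metropolitan']),
--     ('technology', ['technology', 'network', 'digital', 'tech', 'networked', 'filaments', 'bio/techno']),
--     ('journey', ['journey', 'travel', 'path', 'road', 'destination', 'commuter', 'transit']),
--     ('sound_silence', ['silence', 'quiet', 'whisper', 'sound', 'noise', 'silent', 'voice']),
--     ('family_generations', ['family', 'children', 'grandchildren', 'generations', 'ancestors']),
--     ('transformation', ['transformation', 'change', 'evolution', 'becoming', 'transition']),
--     ('connection', ['connection', 'network', 'relationship', 'link', 'bond']),
--     ('isolation', ['isolation', 'alone', 'separate', 'disconnect', 'apart']),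
-- ]
--
-- _IMAGERY = [
--     ('forest', ['woods', 'forest', 'tree', 'leaves']),
--     ('transit', ['station', 'train', 'platform', 'tracks']),
--     ('earth', ['earth', 'ground', 'soil', 'underground']),
--     ('voice', ['voice', 'sound', 'echo', 'whisper']),
--     ('children', ['children', 'child', 'grandchildren']),
--     ('network', ['network', 'filaments', 'connection']),
-- ]
--
-- _EMOTIONS = [
--     ('sorrow', ['cry', 'cried', 'tears', 'weeping']),
--     ('joy', ['joy', 'happy', 'celebration', 'laugh']),
--     ('fear', ['fear', 'afraid', 'terror', 'scared']),
--     ('wonder', ['wonder', 'mysterious', 'strange', 'surprise']),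
--     ('loneliness', ['alone', 'lonely', 'solitude', 'isolation']),
--     ('vitality', ['alive', 'living', 'life', 'vital']),
-- ]
--
-- # every keyword, deduplicated, in first-appearance order
-- _KEYWORDS = list(dict.fromkeys(
--     w for _, words in _THEMES + _IMAGERY + _EMOTIONS for w in words))
--
-- # index the keywords by their first character so each text position only
-- # tries the keywords that could start there
-- _BY_FIRST = {}
-- for _w in _KEYWORDS:
--     _BY_FIRST.setdefault(_w[0], []).append(_w)
--
--
-- def analyze_poem_themes(title: str, content: str):
--     cl = content.lower()
--     # one left-to-right scan of the text: at each offset record which keywords start there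
--     found = set()
--     for i in range(len(cl)):
--         for w in _BY_FIRST.get(cl[i], ()):
--             if w not in found and cl.startswith(w, i):
--                 found.add(w)
--
--     def pick(table):
--         return [label for label, words in table if any(w in found for w in words)]
--
--     return {
--         'themes': pick(_THEMES),
--         'imagery': pick(_IMAGERY),
--         'emotions': pick(_EMOTIONS),
--     }
-- ===== Notes on version B (the rewrite author's own statement) =====
-- stated objective: alternative
-- what changed: Instead of a separate substring search per keyword in three if-chains, B makes one position-by-position scan of the lowered text, trying at each offset only the keywords bucketed under that offset's first character, collecting the set of occurring keywords, and then reads each label list off three ordered (label, keywords) tables by membership in that set.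
import Mathlib
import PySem

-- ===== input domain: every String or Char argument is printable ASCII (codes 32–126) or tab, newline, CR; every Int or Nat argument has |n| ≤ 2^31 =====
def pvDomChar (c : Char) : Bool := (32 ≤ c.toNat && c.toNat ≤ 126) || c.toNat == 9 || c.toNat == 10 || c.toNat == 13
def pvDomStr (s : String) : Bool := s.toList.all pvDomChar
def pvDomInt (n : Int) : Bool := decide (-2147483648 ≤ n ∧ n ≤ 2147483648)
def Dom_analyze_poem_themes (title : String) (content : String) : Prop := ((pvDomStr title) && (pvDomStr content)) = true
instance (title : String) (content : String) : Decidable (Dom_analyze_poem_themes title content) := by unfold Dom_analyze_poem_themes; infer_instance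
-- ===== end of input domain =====

-- B replaces A's per-keyword substring searches by one positional scan of the text
-- collecting the set of occurring keywords, read off three ordered tables (return value only).

-- ===== PORT A =====
-- Literal transliteration: content.lower() once, then three straight-line if-chains
-- appending labels, then the literal result dict as an association list.
def analyze_poem_themes (title : String) (content : String) : List (String × List String) :=
  let content_lower := PySem.Str.lower content
  let themes : List String := []
  let themes := if (["death", "die", "dying", "grave", "cemetery", "mortality"].any fun w => PySem.Str.isIn w content_lower) then themes ++ ["mortality"] else themes
  let themes := if (["love", "heart", "beloved", "romance", "affection"].any fun w => PySem.Str.isIn w content_lower) then themes ++ ["love"] else themes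
  let themes := if (["time", "past", "future", "memory", "remember", "temporal"].any fun w => PySem.Str.isIn w content_lower) then themes ++ ["time"] else themes
  let themes := if (["nature", "tree", "forest", "earth", "green", "woods", "natural"].any fun w => PySem.Str.isIn w content_lower) then themes ++ ["nature"] else themes
  let themes := if (["city", "urban", "street", "building", "train", "station", "metropolitan"].any fun w => PySem.Str.isIn w content_lower) then themes ++ ["urban"] else themes
  let themes := if (["technology", "network", "digital", "tech", "networked", "filaments", "bio/techno"].any fun w => PySem.Str.isIn w content_lower) then themes ++ ["technology"] else themes
  let themes := if (["journey", "travel", "path", "road", "destination", "commuter", "transit"].any fun w => PySem.Str.isIn w content_lower) then themes ++ ["journey"] else themes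
  let themes := if (["silence", "quiet", "whisper", "sound", "noise", "silent", "voice"].any fun w => PySem.Str.isIn w content_lower) then themes ++ ["sound_silence"] else themes
  let themes := if (["family", "children", "grandchildren", "generations", "ancestors"].any fun w => PySem.Str.isIn w content_lower) then themes ++ ["family_generations"] else themes
  let themes := if (["transformation", "change", "evolution", "becoming", "transition"].any fun w => PySem.Str.isIn w content_lower) then themes ++ ["transformation"] else themes
  let themes := if (["connection", "network", "relationship", "link", "bond"].any fun w => PySem.Str.isIn w content_lower) then themes ++ ["connection"] else themes
  let themes := if (["isolation", "alone", "separate", "disconnect", "apart"].any fun w => PySem.Str.isIn w content_lower) then themes ++ ["isolation"] else themes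
  let imagery : List String := []
  let imagery := if (["woods", "forest", "tree", "leaves"].any fun w => PySem.Str.isIn w content_lower) then imagery ++ ["forest"] else imagery
  let imagery := if (["station", "train", "platform", "tracks"].any fun w => PySem.Str.isIn w content_lower) then imagery ++ ["transit"] else imagery
  let imagery := if (["earth", "ground", "soil", "underground"].any fun w => PySem.Str.isIn w content_lower) then imagery ++ ["earth"] else imagery
  let imagery := if (["voice", "sound", "echo", "whisper"].any fun w => PySem.Str.isIn w content_lower) then imagery ++ ["voice"] else imagery
  let imagery := if (["children", "child", "grandchildren"].any fun w => PySem.Str.isIn w content_lower) then imagery ++ ["children"] else imagery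
  let imagery := if (["network", "filaments", "connection"].any fun w => PySem.Str.isIn w content_lower) then imagery ++ ["network"] else imagery
  let emotions : List String := []
  let emotions := if (["cry", "cried", "tears", "weeping"].any fun w => PySem.Str.isIn w content_lower) then emotions ++ ["sorrow"] else emotions
  let emotions := if (["joy", "happy", "celebration", "laugh"].any fun w => PySem.Str.isIn w content_lower) then emotions ++ ["joy"] else emotions
  let emotions := if (["fear", "afraid", "terror", "scared"].any fun w => PySem.Str.isIn w content_lower) then emotions ++ ["fear"] else emotions
  let emotions := if (["wonder", "mysterious", "strange", "surprise"].any fun w => PySem.Str.isIn w content_lower) then emotions ++ ["wonder"] else emotions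
  let emotions := if (["alone", "lonely", "solitude", "isolation"].any fun w => PySem.Str.isIn w content_lower) then emotions ++ ["loneliness"] else emotions
  let emotions := if (["alive", "living", "life", "vital"].any fun w => PySem.Str.isIn w content_lower) then emotions ++ ["vitality"] else emotions
  [("themes", themes), ("imagery", imagery), ("emotions", emotions)]

-- ===== PORT B =====
def pvTableThemes : List (String × List String) :=
  [("mortality", ["death", "die", "dying", "grave", "cemetery", "mortality"]),
   ("love", ["love", "heart", "beloved", "romance", "affection"]),
   ("time", ["time", "past", "future", "memory", "remember", "temporal"]),
   ("nature", ["nature", "tree", "forest", "earth", "green", "woods", "natural"]),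
   ("urban", ["city", "urban", "street", "building", "train", "station", "metropolitan"]),
   ("technology", ["technology", "network", "digital", "tech", "networked", "filaments", "bio/techno"]),
   ("journey", ["journey", "travel", "path", "road", "destination", "commuter", "transit"]),
   ("sound_silence", ["silence", "quiet", "whisper", "sound", "noise", "silent", "voice"]),
   ("family_generations", ["family", "children", "grandchildren", "generations", "ancestors"]),
   ("transformation", ["transformation", "change", "evolution", "becoming", "transition"]),
   ("connection", ["connection", "network", "relationship", "link", "bond"]),
   ("isolation", ["isolation", "alone", "separate", "disconnect", "apart"])]

def pvTableImagery : List (String × List String) :=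
  [("forest", ["woods", "forest", "tree", "leaves"]),
   ("transit", ["station", "train", "platform", "tracks"]),
   ("earth", ["earth", "ground", "soil", "underground"]),
   ("voice", ["voice", "sound", "echo", "whisper"]),
   ("children", ["children", "child", "grandchildren"]),
   ("network", ["network", "filaments", "connection"])]

def pvTableEmotions : List (String × List String) :=
  [("sorrow", ["cry", "cried", "tears", "weeping"]),
   ("joy", ["joy", "happy", "celebration", "laugh"]),
   ("fear", ["fear", "afraid", "terror", "scared"]),
   ("wonder", ["wonder", "mysterious", "strange", "surprise"]),
   ("loneliness", ["alone", "lonely", "solitude", "isolation"]),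
   ("vitality", ["alive", "living", "life", "vital"])]

-- _KEYWORDS = list(dict.fromkeys(w for _, words in tables for w in words))
def pvKeywords : List String :=
  PySem.List.dedup ((pvTableThemes ++ pvTableImagery ++ pvTableEmotions).flatMap Prod.snd)

-- w[0] of a (nonempty) keyword; the 1-character Python string key is represented by its Char
def pvFirstChar (w : String) : Char := w.toList.headD ' '

-- _BY_FIRST: for w in _KEYWORDS: _BY_FIRST.setdefault(w[0], []).append(w)
def pvByFirst : PySem.Dict Char (List String) :=
  pvKeywords.foldl (fun d w => d.insert (pvFirstChar w) (d.getD (pvFirstChar w) [] ++ [w]))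
    PySem.Dict.empty

-- the inner 'for w in _BY_FIRST.get(cl[i], ()): if w not in found and cl.startswith(w, i): …';
-- cl[i] is the head of the suffix drop i cl (the empty suffix corresponds to no position and scans nothing)
def pvScanAt (suf : List Char) (found : PySem.Set String) : PySem.Set String :=
  match suf with
  | [] => found
  | c :: _ =>
      (pvByFirst.getD c []).foldl (fun acc w =>
        if ¬ acc.contains w ∧ w.toList.isPrefixOf suf then PySem.Set.add acc w else acc) found

-- 'for i in range(len(cl)): …' — cl.startswith(w, i) tests w against drop i cl,
-- and cl.toList.tails enumerates drop 0 … drop len, so the outer loop is a fold over tails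
def pvFound (cl : List Char) : PySem.Set String :=
  cl.tails.foldl (fun acc suf => pvScanAt suf acc) PySem.Set.empty

-- '[label for label, words in table if any(w in found for w in words)]'
def pvPick (found : PySem.Set String) : List (String × List String) → List String
  | [] => []
  | (label, words) :: rest =>
      if words.any (fun w => found.contains w) then label :: pvPick found rest
      else pvPick found rest

def analyze_poem_themes_alt (title : String) (content : String) : List (String × List String) :=
  let cl := PySem.Str.lower content
  let found := pvFound cl.toList
  [("themes", pvPick found pvTableThemes),
   ("imagery", pvPick found pvTableImagery),
   ("emotions", pvPick found pvTableEmotions)]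

-- ===== PRECONDITION & SPEC =====
def Spec_analyze_poem_themes (title : String) (content : String) (out : List (String × List String)) : Prop := out = analyze_poem_themes_alt title content
instance (title : String) (content : String) (out : List (String × List String)) : Decidable (Spec_analyze_poem_themes title content out) := by unfold Spec_analyze_poem_themes; infer_instance

-- ===== CLAIM =====
def Claim_equal_analyze_poem_themes : Prop := ∀ (title : String) (content : String), Dom_analyze_poem_themes title content → Spec_analyze_poem_themes title content (analyze_poem_themes title content)

-- ===== LEMMAS AND PROOFS =====

theorem pv_contains_mem (s : PySem.Set String) (w : String) : s.contains w = true ↔ w ∈ s := by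
  simp [PySem.Set.contains]

-- every keyword is nonempty and sits in the bucket of its first character
set_option maxRecDepth 100000 in
theorem pv_key_facts :
    pvKeywords.all (fun w => !w.toList.isEmpty && (pvByFirst.getD (pvFirstChar w) []).contains w)
      = true := by decide

-- membership in one inner scan step over an arbitrary keyword list
theorem pv_mem_scan_inner (kws : List String) (suf : List Char) (found : PySem.Set String)
    (w : String) :
    w ∈ kws.foldl (fun acc w =>
        if ¬ acc.contains w ∧ w.toList.isPrefixOf suf then PySem.Set.add acc w else acc) found ↔
      w ∈ found ∨ (w ∈ kws ∧ w.toList.isPrefixOf suf = true) := by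
  induction kws generalizing found with
  | nil => simp
  | cons k rest ih =>
      simp only [List.foldl_cons, ih]
      split
      · rename_i h
        simp only [PySem.Set.mem_add, List.mem_cons]
        constructor
        · rintro ((hf | rfl) | ⟨hk, hp⟩)
          · exact Or.inl hf
          · exact Or.inr ⟨Or.inl rfl, h.2⟩
          · exact Or.inr ⟨Or.inr hk, hp⟩
        · rintro (hf | ⟨hk | hk, hp⟩)
          · exact Or.inl (Or.inl hf)
          · exact Or.inl (Or.inr hk)
          · exact Or.inr ⟨hk, hp⟩
      · rename_i h
        rw [Classical.not_and_iff_not_or_not, not_not] at h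
        simp only [List.mem_cons]
        constructor
        · rintro (hf | ⟨hk, hp⟩)
          · exact Or.inl hf
          · exact Or.inr ⟨Or.inr hk, hp⟩
        · rintro (hf | ⟨hk | hk, hp⟩)
          · exact Or.inl hf
          · subst hk
            rcases h with h | h
            · rw [pv_contains_mem] at h; exact Or.inl h
            · exact absurd hp h
          · exact Or.inr ⟨hk, hp⟩

-- one scan step: something was added only if the suffix is nonempty, the word lies in the
-- bucket of its head character, and the word is a prefix of the suffix
theorem pv_mem_scanAt (suf : List Char) (found : PySem.Set String) (w : String) :
    w ∈ pvScanAt suf found ↔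
      w ∈ found ∨ (∃ c rest, suf = c :: rest ∧ w ∈ pvByFirst.getD c [] ∧
        w.toList.isPrefixOf suf = true) := by
  match suf with
  | [] => simp [pvScanAt]
  | c :: rest =>
      rw [pvScanAt, pv_mem_scan_inner]
      constructor
      · rintro (hf | ⟨hb, hp⟩)
        · exact Or.inl hf
        · exact Or.inr ⟨c, rest, rfl, hb, hp⟩
      · rintro (hf | ⟨c', r', heq, hb, hp⟩)
        · exact Or.inl hf
        · cases heq; exact Or.inr ⟨hb, hp⟩

-- membership in the whole text scan = the keyword occurs somewhere in the text
theorem pv_mem_found (cl : List Char) (w : String) (hw : w ∈ pvKeywords) :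
    w ∈ pvFound cl ↔ w.toList <:+: cl := by
  unfold pvFound
  have main : ∀ (sufs : List (List Char)) (acc : PySem.Set String),
      w ∈ sufs.foldl (fun acc suf => pvScanAt suf acc) acc ↔
      w ∈ acc ∨ (∃ suf ∈ sufs, ∃ c rest, suf = c :: rest ∧ w ∈ pvByFirst.getD c [] ∧
        w.toList.isPrefixOf suf = true) := by
    intro sufs
    induction sufs with
    | nil => simp
    | cons s rest ih =>
        intro acc
        simp only [List.foldl_cons, ih, pv_mem_scanAt, List.mem_cons]
        constructor
        · rintro ((hf | h) | ⟨suf, hs, h⟩)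
          · exact Or.inl hf
          · exact Or.inr ⟨s, Or.inl rfl, h⟩
          · exact Or.inr ⟨suf, Or.inr hs, h⟩
        · rintro (hf | ⟨suf, hs | hs, h⟩)
          · exact Or.inl (Or.inl hf)
          · subst hs; exact Or.inl (Or.inr h)
          · exact Or.inr ⟨suf, hs, h⟩
  have hfacts := List.all_eq_true.mp pv_key_facts w hw
  rw [Bool.and_eq_true, Bool.not_eq_eq_eq_not, Bool.not_true, List.isEmpty_eq_false_iff] at hfacts
  obtain ⟨hne, hbucket'⟩ := hfacts
  have hbucket := List.contains_iff_mem.mp hbucket'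
  rw [main]
  simp only [PySem.Set.empty, List.not_mem_nil, false_or]
  constructor
  · rintro ⟨suf, hs, c, r, rfl, hb, hp⟩
    rw [List.mem_tails _ _] at hs
    rw [List.isPrefixOf_iff_prefix] at hp
    exact hp.isInfix.trans hs.isInfix
  · intro hinf
    rcases List.infix_iff_prefix_suffix.mp hinf with ⟨t, hpre, hsuf⟩
    obtain ⟨d, tl, hlist⟩ := List.exists_cons_of_ne_nil hne
    obtain ⟨t', rfl⟩ := hpre
    refine ⟨w.toList ++ t', (List.mem_tails _ _).mpr hsuf, d, tl ++ t',
      by rw [hlist]; rfl, ?_, ?_⟩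
    · have hfc : pvFirstChar w = d := by rw [pvFirstChar, hlist]; rfl
      rwa [hfc] at hbucket
    · rw [List.isPrefixOf_iff_prefix]
      exact ⟨t', rfl⟩
-- for a word of the tables, membership in the scanned set IS Python's 'w in cl'
theorem pv_contains_found (cl : String) (w : String) (hw : w ∈ pvKeywords) :
    PySem.Set.contains (pvFound cl.toList) w = PySem.Str.isIn w cl := by
  rw [Bool.eq_iff_iff, pv_contains_mem, pv_mem_found _ _ hw, PySem.Str.isIn_iff_infix]

theorem pv_any_congr {α : Type} (l : List α) (f g : α → Bool) (h : ∀ x ∈ l, f x = g x) :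
    l.any f = l.any g := by
  induction l with
  | nil => rfl
  | cons a t ih =>
      simp only [List.any_cons, h a (List.mem_cons_self), ih (fun x hx => h x (List.mem_cons_of_mem a hx))]

-- the pick over a table whose words all appear in pvKeywords, phrased with Str.isIn
theorem pv_pick_eq (cl : String) (table : List (String × List String))
    (h : ∀ p ∈ table, ∀ w ∈ p.2, w ∈ pvKeywords) :
    pvPick (pvFound cl.toList) table =
      table.foldr (fun p acc => if p.2.any (fun w => PySem.Str.isIn w cl) then p.1 :: acc else acc) [] := by
  induction table with
  | nil => rfl
  | cons p rest ih =>
      obtain ⟨label, words⟩ := p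
      simp only [pvPick, List.foldr_cons]
      rw [pv_any_congr words _ _ (fun w hw => pv_contains_found cl w (h _ List.mem_cons_self w hw)),
        ih (fun q hq => h q (List.mem_cons_of_mem _ hq))]

-- both if-shapes normalise to 'pvSeg c x ++ rest'
def pvSeg (c : Prop) [Decidable c] (x : String) : List String := if c then [x] else []

theorem pv_ite_append (c : Prop) [Decidable c] (a : List String) (x : String) :
    (if c then a ++ [x] else a) = a ++ pvSeg c x := by
  unfold pvSeg; split <;> simp

theorem pv_ite_cons (c : Prop) [Decidable c] (x : String) (r : List String) :
    (if c then x :: r else r) = pvSeg c x ++ r := by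
  unfold pvSeg; split <;> simp

-- ===== VERDICT =====
set_option maxRecDepth 100000 in
theorem analyze_poem_themes_spec : Claim_equal_analyze_poem_themes := by
  intro title content _
  show _ = _
  simp only [analyze_poem_themes, analyze_poem_themes_alt]
  rw [pv_pick_eq _ _ (by decide), pv_pick_eq _ _ (by decide), pv_pick_eq _ _ (by decide)]
  simp only [pvTableThemes, pvTableImagery, pvTableEmotions, List.foldr_cons, List.foldr_nil,
    pv_ite_append, pv_ite_cons]
  simp only [List.nil_append, List.append_nil, List.append_assoc]
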